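-- pv_equiv track=rewrite | github.com/Ughlympics/Sym_crypto | Lab2/method2.py | coincidence_index
-- ===== SOURCE A (Python) =====
-- def coincidence_index(text, max_r=20):
--     n = len(text)
--     stats = {}
--
--     for r in range(1, max_r + 1):
--         D_r = 0
--         for i in range(n - r):
--             if text[i] == text[i + r]:
--                 D_r += 1
--         stats[r] = D_r
--
--     return stats
-- ===== SOURCE B (Python) =====
-- def coincidence_index(text, max_r=20):
--     positions = {}
--     for i, ch in enumerate(text):
--         positions.setdefault(ch, []).append(i)
--     stats = {r: 0 for r in range(1, max_r + 1)}
--     for ps in positions.values():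
--         for a in range(len(ps)):
--             p = ps[a]
--             for q in ps[a + 1:]:
--                 d = q - p
--                 if d > max_r:
--                     break
--                 stats[d] += 1
--     return stats
-- ===== Notes on version B (the rewrite author's own statement) =====
-- stated objective: alternative
-- what changed: Instead of re-scanning the whole text for every shift r, B builds a per-character index of occurrence positions in one pass and then counts, for each character's sorted position list, the pair differences d with 1 <= d <= max_r (breaking early), into a pre-initialized counter dict.
import Mathlib
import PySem

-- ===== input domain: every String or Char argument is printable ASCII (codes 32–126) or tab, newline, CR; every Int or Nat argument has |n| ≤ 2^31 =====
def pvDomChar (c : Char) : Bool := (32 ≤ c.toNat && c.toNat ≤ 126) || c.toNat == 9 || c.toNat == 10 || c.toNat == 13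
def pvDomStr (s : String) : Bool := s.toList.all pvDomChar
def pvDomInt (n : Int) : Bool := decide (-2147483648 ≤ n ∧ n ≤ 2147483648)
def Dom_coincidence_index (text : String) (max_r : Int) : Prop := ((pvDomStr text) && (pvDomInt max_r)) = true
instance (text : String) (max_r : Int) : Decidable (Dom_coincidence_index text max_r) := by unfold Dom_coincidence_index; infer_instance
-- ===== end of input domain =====

-- B replaces A's per-shift rescans by a one-pass per-character position index whose
-- pair differences ≤ max_r are tallied into a pre-initialized counter dict (objective: alternative).

-- ===== PORT A =====
def coincidence_index (text : String) (max_r : Int) : List (Int × Int) :=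
  let n : Int := PySem.Str.len text
  let stats : PySem.Dict Int Int :=
    (PySem.List.pyRange 1 (max_r + 1) 1).foldl (fun stats r =>
      let D_r : Int :=
        (PySem.List.pyRange 0 (n - r) 1).foldl (fun D_r i =>
          if PySem.Str.pyGet? text i = PySem.Str.pyGet? text (i + r) then D_r + 1 else D_r) 0
      stats.insert r D_r) PySem.Dict.empty
  stats.items

-- ===== PORT B =====
-- inner loop 'for q in ps[a+1:]: d = q - p; if d > max_r: break; stats[d] += 1'
-- (stats[d] += 1 on an existing key, ported as modify; the proofs show d is always a key)
def pvInnerB (max_r p : Int) (stats : PySem.Dict Int Int) : List Int → PySem.Dict Int Int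
  | [] => stats
  | q :: qs =>
    if q - p > max_r then stats
    else pvInnerB max_r p (stats.modify (q - p) 0 (· + 1)) qs

-- 'for a in range(len(ps)): p = ps[a]; <inner loop over ps[a+1:]>'
def pvPairsB (max_r : Int) (stats : PySem.Dict Int Int) : List Int → PySem.Dict Int Int
  | [] => stats
  | p :: qs => pvPairsB max_r (pvInnerB max_r p stats qs) qs

def coincidence_index_alt (text : String) (max_r : Int) : List (Int × Int) :=
  let positions : PySem.Dict Char (List Int) :=
    (PySem.List.enumerate text.toList 0).foldl
      (fun d pr => d.modify pr.2 ([] : List Int) (fun l => l ++ [pr.1])) PySem.Dict.empty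
  let stats0 : PySem.Dict Int Int :=
    (PySem.List.pyRange 1 (max_r + 1) 1).foldl (fun d r => d.insert r 0) PySem.Dict.empty
  let stats := positions.values.foldl (fun st ps => pvPairsB max_r st ps) stats0
  stats.items

-- ===== PRECONDITION & SPEC =====
def Spec_coincidence_index (text : String) (max_r : Int) (out : List (Int × Int)) : Prop := out = coincidence_index_alt text max_r
instance (text : String) (max_r : Int) (out : List (Int × Int)) : Decidable (Spec_coincidence_index text max_r out) := by unfold Spec_coincidence_index; infer_instance

-- ===== CLAIM (what is proved, stated in full; the proofs are below) =====
def Claim_equal_coincidence_index : Prop := ∀ (text : String) (max_r : Int), Dom_coincidence_index text max_r → Spec_coincidence_index text max_r (coincidence_index text max_r)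

-- ===== LEMMAS AND PROOFS =====

def pvModAdd (d : PySem.Dict Int Int) (x : Int) : PySem.Dict Int Int := d.modify x 0 (· + 1)

def pvEvs (max_r : Int) : List Int → List Int
  | [] => []
  | p :: qs => (qs.takeWhile (fun q => decide (q - p ≤ max_r))).map (fun q => q - p) ++ pvEvs max_r qs

theorem pvInnerB_eq (max_r p : Int) (qs : List Int) (stats : PySem.Dict Int Int) :
    pvInnerB max_r p stats qs =
      ((qs.takeWhile (fun q => decide (q - p ≤ max_r))).map (fun q => q - p)).foldl pvModAdd stats := by
  induction qs generalizing stats with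
  | nil => rfl
  | cons q qs ih =>
    by_cases h : q - p > max_r
    · simp only [pvInnerB, if_pos h, List.takeWhile_cons]
      rw [if_neg (by simp; omega)]
      rfl
    · simp only [pvInnerB, if_neg h, List.takeWhile_cons]
      rw [if_pos (by simp; omega), List.map_cons, List.foldl_cons, ih]
      rfl

theorem pvPairsB_eq (max_r : Int) (ps : List Int) (stats : PySem.Dict Int Int) :
    pvPairsB max_r stats ps = (pvEvs max_r ps).foldl pvModAdd stats := by
  induction ps generalizing stats with
  | nil => rfl
  | cons p qs ih => simp [pvPairsB, pvEvs, List.foldl_append, pvInnerB_eq, ih]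

theorem pvValuesFold_eq (max_r : Int) (vs : List (List Int)) (stats : PySem.Dict Int Int) :
    vs.foldl (fun st ps => pvPairsB max_r st ps) stats =
      (vs.flatMap (pvEvs max_r)).foldl pvModAdd stats := by
  induction vs generalizing stats with
  | nil => rfl
  | cons v vs ih =>
    simp only [List.foldl_cons, List.flatMap_cons, List.foldl_append]
    rw [pvPairsB_eq]; exact ih _

theorem pvStats0_getD (r : Int) (l : List Int) (d : PySem.Dict Int Int) (hd : d.getD r 0 = 0) :
    (l.foldl (fun d r => d.insert r 0) d).getD r 0 = 0 := by
  induction l generalizing d with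
  | nil => exact hd
  | cons x l ih =>
    rw [List.foldl_cons]
    exact ih _ (by rw [PySem.Dict.getD_insert]; split <;> simp [hd])

theorem pvStats0_keys (max_r : Int) :
    ((PySem.List.pyRange 1 (max_r + 1) 1).foldl (fun d r => d.insert r 0)
        (PySem.Dict.empty : PySem.Dict Int Int)).keys
      = PySem.List.pyRange 1 (max_r + 1) 1 := by
  rw [PySem.Dict.keys_foldl_insert (f := fun _ _ => 0)]
  simp only [PySem.Dict.keys_empty]
  show PySem.Set.ofList _ = _
  exact PySem.Set.ofList_eq_self_of_nodup _ (PySem.List.nodup_pyRange_one 1 (max_r + 1))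

theorem pvPosGetD (l : List (Int × Char)) (d : PySem.Dict Char (List Int)) (c : Char) :
    (l.foldl (fun d pr => d.modify pr.2 ([] : List Int) (fun t => t ++ [pr.1])) d).getD c []
      = d.getD c [] ++ (l.filter (fun pr => pr.2 == c)).map (·.1) := by
  induction l generalizing d with
  | nil => simp
  | cons pr l ih =>
    rw [List.foldl_cons, ih, List.filter_cons]
    by_cases hc : pr.2 = c
    · simp [hc]
    · simp [hc, PySem.Dict.getD_modify, Ne.symm hc]

theorem pvSetUpdate_self {α : Type} [BEq α] [LawfulBEq α] (l : List α) (s : PySem.Set α)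
    (h : ∀ x ∈ l, x ∈ s) : PySem.Set.update s l = s := by
  induction l generalizing s with
  | nil => rfl
  | cons x l ih =>
    show PySem.Set.update (PySem.Set.add s x) l = s
    rw [show PySem.Set.add s x = s by simp [PySem.Set.add, PySem.Set.contains, h x (by simp)]]
    exact ih s (fun y hy => h y (by simp [hy]))

theorem pvTakeWhile_eq_filter (p c : Int) (qs : List Int) (h : qs.Pairwise (· < ·)) :
    qs.takeWhile (fun q => decide (q - p ≤ c)) = qs.filter (fun q => decide (q - p ≤ c)) := by
  induction qs with
  | nil => rfl
  | cons q qs ih =>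
    rw [List.pairwise_cons] at h
    rw [List.takeWhile_cons, List.filter_cons]
    by_cases hq : q - p ≤ c
    · rw [if_pos (by simp; omega), if_pos (by simp; omega), ih h.2]
    · rw [if_neg (by simp; omega), if_neg (by simp; omega)]
      symm
      rw [List.filter_eq_nil_iff]
      intro x hx
      have := h.1 x hx
      simp; omega

theorem pvEvs_mem (max_r : Int) (ps : List Int) (h : ps.Pairwise (· < ·)) (e : Int)
    (he : e ∈ pvEvs max_r ps) : 1 ≤ e ∧ e ≤ max_r := by
  induction ps with
  | nil => simp [pvEvs] at he
  | cons p qs ih =>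
    rw [List.pairwise_cons] at h
    rw [pvEvs, List.mem_append] at he
    rcases he with he | he
    · obtain ⟨q, hq, rfl⟩ := List.mem_map.1 he
      have hq' : q ∈ qs := (List.takeWhile_sublist _).subset hq
      have hp := List.mem_takeWhile_imp hq
      have := h.1 q hq'
      simp at hp
      omega
    · exact ih h.2 he

theorem pvEvs_count (max_r r : Int) (hr1 : 1 ≤ r) (hr2 : r ≤ max_r) (ps : List Int)
    (h : ps.Pairwise (· < ·)) :
    (pvEvs max_r ps).count r = ps.countP (fun p => decide ((p + r) ∈ ps)) := by
  induction ps with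
  | nil => rfl
  | cons p qs ih =>
    rw [List.pairwise_cons] at h
    have hnd : qs.Nodup := h.2.imp (fun hlt => ne_of_lt hlt)
    rw [pvEvs, List.count_append, pvTakeWhile_eq_filter p max_r qs h.2, ih h.2]
    -- head part: count of r among the differences q - p, q ∈ qs, q - p ≤ max_r
    have h1 : ((qs.filter (fun q => decide (q - p ≤ max_r))).map (fun q => q - p)).count r
        = qs.count (p + r) := by
      rw [List.count_eq_countP, List.countP_map, List.countP_filter, List.count_eq_countP]
      refine List.countP_congr (fun q _ => ?_)
      simp only [Function.comp]
      constructor <;> (intro hq; simp at hq ⊢; omega)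
    rw [h1, List.countP_cons]
    have h2 : qs.countP (fun x => decide ((x + r) ∈ p :: qs)) = qs.countP (fun x => decide ((x + r) ∈ qs)) := by
      refine List.countP_congr (fun x hx => ?_)
      have := h.1 x hx
      simp only [decide_eq_true_eq, List.mem_cons]
      constructor
      · rintro (hc | hc)
        · omega
        · exact hc
      · exact fun hc => Or.inr hc
    rw [h2]
    have hpr : ((p + r) ∈ p :: qs) ↔ ((p + r) ∈ qs) := by
      simp only [List.mem_cons]
      constructor
      · rintro (hc | hc)
        · omega
        · exact hc
      · exact fun hc => Or.inr hc
    by_cases hm : (p + r) ∈ qs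
    · rw [List.count_eq_one_of_mem hnd hm]
      rw [if_pos (by simp only [decide_eq_true_eq]; exact hpr.2 hm)]
      omega
    · rw [List.count_eq_zero_of_not_mem hm]
      rw [if_neg (by simp only [decide_eq_true_eq]; exact fun hc => hm (hpr.1 hc))]
      omega

theorem pvGet?_eq (L : List Char) (i : Int) (h0 : 0 ≤ i) (h1 : i < L.length) (d : Char) :
    PySem.List.pyGet? L i = some (PySem.List.pyGetD L i d) := by
  have h : PySem.List.pyGet? L i = some L[i.toNat] := by
    simp only [PySem.List.pyGet?, PySem.List.pyIdx?, if_pos h0, if_pos h1, Option.bind_some]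
    exact List.getElem?_eq_getElem (by omega)
  rw [h, PySem.List.pyGetD_eq_getElem L d h0 h1]

theorem pvCastSum (C : List Char) (f : Char → Nat) :
    (((C.map f).sum : Nat) : Int) = (C.map (fun c => (f c : Int))).sum := by
  induction C with
  | nil => simp
  | cons x l ih => simp [ih]

theorem pvSwapCount (C : List Char) (l : List Int) (P : Char → Int → Bool) (Q : Int → Bool)
    (h : ∀ p ∈ l, C.countP (fun c => P c p) = if Q p then 1 else 0) :
    (C.map (fun c => (l.countP (P c) : Int))).sum = (l.countP Q : Int) := by
  induction l with
  | nil => simp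
  | cons p l ih =>
    have hmap : (C.map (fun c => ((p :: l).countP (P c) : Int)))
        = C.map (fun c => (l.countP (P c) : Int) + (if P c p then (1 : Int) else 0)) := by
      refine List.map_congr_left (fun c _ => ?_)
      rw [List.countP_cons]
      split <;> push_cast <;> ring
    rw [hmap, PySem.List.sum_map_add_int, ih (fun x hx => h x (List.mem_cons_of_mem _ hx))]
    have h2 : (C.map (fun c => if P c p then (1 : Int) else 0)).sum
        = ((C.countP (fun c => P c p) : Nat) : Int) :=
      PySem.List.sum_map_ite_one_zero (fun c => P c p) C
    rw [h2, h p (List.mem_cons_self), List.countP_cons]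
    split <;> simp

def pvPosIdx (L : List Char) (c : Char) : List Int :=
  ((PySem.List.enumerate L 0).filter (fun pr => pr.2 == c)).map (·.1)

theorem pvPosIdx_eq (L : List Char) (c : Char) :
    pvPosIdx L c = (PySem.List.pyRange 0 (L.length : Int) 1).filter
      (fun j => PySem.List.pyGetD L j 'a' == c) := by
  unfold pvPosIdx
  rw [PySem.List.enumerate_eq_map_pyRange L 'a', List.filter_map, List.map_map]
  simp only [PySem.List.len_eq, Function.comp_def, List.map_id_fun']
  rfl

theorem pvPosIdx_sorted (L : List Char) (c : Char) : (pvPosIdx L c).Pairwise (· < ·) := by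
  rw [pvPosIdx_eq]
  exact (PySem.List.pairwise_lt_pyRange_one 0 (L.length : Int)).filter _

theorem pvPointwise (L : List Char) (r : Int) (hr1 : 1 ≤ r) (p : Int)
    (hp : p ∈ PySem.List.pyRange 0 (L.length : Int) 1) :
    (PySem.Set.ofList L).countP (fun c => (PySem.List.pyGetD L p 'a' == c)
        && decide (0 ≤ p + r ∧ p + r < (L.length : Int) ∧ PySem.List.pyGetD L (p + r) 'a' = c))
      = if (decide (p + r < (L.length : Int))
            && (PySem.List.pyGetD L p 'a' == PySem.List.pyGetD L (p + r) 'a')) then 1 else 0 := by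
  rw [PySem.List.mem_pyRange_one] at hp
  have hmem : PySem.List.pyGetD L p 'a' ∈ PySem.Set.ofList L := by
    rw [PySem.Set.mem_ofList]
    rw [PySem.List.pyGetD_eq_getElem L 'a' hp.1 hp.2]
    exact List.getElem_mem _
  by_cases hQ : p + r < (L.length : Int) ∧ PySem.List.pyGetD L p 'a' = PySem.List.pyGetD L (p + r) 'a'
  · have hcong : (PySem.Set.ofList L).countP (fun c => (PySem.List.pyGetD L p 'a' == c)
        && decide (0 ≤ p + r ∧ p + r < (L.length : Int) ∧ PySem.List.pyGetD L (p + r) 'a' = c))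
        = (PySem.Set.ofList L).countP (fun c => c == PySem.List.pyGetD L p 'a') := by
      refine List.countP_congr (fun c _ => ?_)
      constructor
      · intro hc
        simp only [Bool.and_eq_true, beq_iff_eq, decide_eq_true_eq] at hc
        simp [hc.1]
      · intro hc
        simp only [beq_iff_eq] at hc
        simp only [Bool.and_eq_true, beq_iff_eq, decide_eq_true_eq]
        refine ⟨hc.symm, by omega, hQ.1, by rw [hc, ← hQ.2]⟩
    rw [hcong, show (PySem.Set.ofList L).countP (fun c => c == PySem.List.pyGetD L p 'a')
        = (PySem.Set.ofList L).count (PySem.List.pyGetD L p 'a') from rfl,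
      List.count_eq_one_of_mem (PySem.Set.nodup_ofList L) hmem,
      if_pos (by simp only [Bool.and_eq_true, beq_iff_eq, decide_eq_true_eq]; exact hQ)]
  · rw [List.countP_eq_zero.2, if_neg (by simp only [Bool.and_eq_true, beq_iff_eq, decide_eq_true_eq]; exact hQ)]
    intro c _ hc
    simp only [Bool.and_eq_true, beq_iff_eq, decide_eq_true_eq] at hc
    exact hQ ⟨hc.2.2.1, by rw [hc.1, hc.2.2.2]⟩

theorem pvRangeCount (L : List Char) (r : Int) (hr1 : 1 ≤ r) :
    (PySem.List.pyRange 0 (L.length : Int) 1).countP (fun p => decide (p + r < (L.length : Int))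
        && (PySem.List.pyGetD L p 'a' == PySem.List.pyGetD L (p + r) 'a'))
      = (PySem.List.pyRange 0 ((L.length : Int) - r) 1).countP
          (fun i => decide (PySem.List.pyGet? L i = PySem.List.pyGet? L (i + r))) := by
  by_cases hn : (L.length : Int) - r ≤ 0
  · rw [PySem.List.pyRange_one_eq_nil hn, List.countP_nil, List.countP_eq_zero.2]
    intro p hp hc
    rw [PySem.List.mem_pyRange_one] at hp
    simp only [Bool.and_eq_true, decide_eq_true_eq] at hc
    omega
  · rw [PySem.List.pyRange_one_append 0 ((L.length : Int) - r) (L.length : Int) (by omega) (by omega),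
      List.countP_append]
    have h2 : (PySem.List.pyRange ((L.length : Int) - r) (L.length : Int) 1).countP
        (fun p => decide (p + r < (L.length : Int))
          && (PySem.List.pyGetD L p 'a' == PySem.List.pyGetD L (p + r) 'a')) = 0 := by
      rw [List.countP_eq_zero.2]
      intro p hp hc
      rw [PySem.List.mem_pyRange_one] at hp
      simp only [Bool.and_eq_true, decide_eq_true_eq] at hc
      omega
    rw [h2, Nat.add_zero]
    refine List.countP_congr (fun p hp => ?_)
    rw [PySem.List.mem_pyRange_one] at hp
    rw [pvGet?_eq L p (by omega) (by omega) 'a', pvGet?_eq L (p + r) (by omega) (by omega) 'a']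
    simp only [Bool.and_eq_true, decide_eq_true_eq, beq_iff_eq, Option.some.injEq]
    constructor
    · exact fun h => h.2
    · exact fun h => ⟨by omega, h⟩

theorem pvPosCountP (L : List Char) (r : Int) (c : Char) :
    (pvPosIdx L c).countP (fun p => decide ((p + r) ∈ pvPosIdx L c))
      = (PySem.List.pyRange 0 (L.length : Int) 1).countP
          (fun p => (PySem.List.pyGetD L p 'a' == c)
            && decide (0 ≤ p + r ∧ p + r < (L.length : Int) ∧ PySem.List.pyGetD L (p + r) 'a' = c)) := by
  conv_lhs => rw [pvPosIdx_eq]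
  rw [List.countP_filter]
  refine List.countP_congr (fun p _ => ?_)
  simp only [Bool.and_eq_true, decide_eq_true_eq, beq_iff_eq, List.mem_filter,
    PySem.List.mem_pyRange_one]
  tauto

theorem pvCountEq (L : List Char) (max_r r : Int) (hr1 : 1 ≤ r) (hr2 : r ≤ max_r) :
    ((((PySem.Set.ofList L).map (pvPosIdx L)).flatMap (pvEvs max_r)).count r : Int)
      = ((PySem.List.pyRange 0 ((L.length : Int) - r) 1).countP
          (fun i => decide (PySem.List.pyGet? L i = PySem.List.pyGet? L (i + r))) : Int) := by
  rw [List.count_flatMap, List.map_map]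
  rw [pvCastSum (PySem.Set.ofList L) ((List.count r ∘ pvEvs max_r) ∘ pvPosIdx L)]
  rw [← pvRangeCount L r hr1]
  refine Eq.trans ?_ (pvSwapCount (PySem.Set.ofList L) (PySem.List.pyRange 0 (L.length : Int) 1)
    (fun c p => (PySem.List.pyGetD L p 'a' == c)
      && decide (0 ≤ p + r ∧ p + r < (L.length : Int) ∧ PySem.List.pyGetD L (p + r) 'a' = c))
    (fun p => decide (p + r < (L.length : Int))
      && (PySem.List.pyGetD L p 'a' == PySem.List.pyGetD L (p + r) 'a'))
    (fun p hp => pvPointwise L r hr1 p hp))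
  refine congrArg List.sum (List.map_congr_left (fun c _ => ?_))
  simp only [Function.comp]
  rw [pvEvs_count max_r r hr1 hr2 _ (pvPosIdx_sorted L c), pvPosCountP L r c]

theorem pvA_eq (text : String) (max_r : Int) :
    coincidence_index text max_r = (PySem.List.pyRange 1 (max_r + 1) 1).map
      (fun r => (r, ((PySem.List.pyRange 0 (PySem.Str.len text - r) 1).countP
          (fun i => decide (PySem.Str.pyGet? text i = PySem.Str.pyGet? text (i + r))) : Int))) := by
  show (List.foldl (fun stats r => stats.insert r
      ((PySem.List.pyRange 0 (PySem.Str.len text - r) 1).foldl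
        (fun D_r i => if PySem.Str.pyGet? text i = PySem.Str.pyGet? text (i + r) then D_r + 1 else D_r) 0))
      (PySem.Dict.empty : PySem.Dict Int Int) (PySem.List.pyRange 1 (max_r + 1) 1)).items = _
  have hitems := PySem.Dict.items_foldl_insert_fresh (PySem.List.pyRange 1 (max_r + 1) 1)
      (fun r : Int => r)
      (fun r => (PySem.List.pyRange 0 (PySem.Str.len text - r) 1).foldl
        (fun D_r i => if PySem.Str.pyGet? text i = PySem.Str.pyGet? text (i + r) then D_r + 1 else D_r) (0 : Int))
      (PySem.Dict.empty : PySem.Dict Int Int)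
      (fun a _ => by simp)
      (by simpa using PySem.List.nodup_pyRange_one 1 (max_r + 1))
  refine hitems.trans ?_
  rw [show (PySem.Dict.empty : PySem.Dict Int Int).items = [] from rfl, List.nil_append]
  refine List.map_congr_left (fun r _ => ?_)
  beta_reduce
  rw [PySem.List.foldl_ite_add_one (fun i => PySem.Str.pyGet? text i = PySem.Str.pyGet? text (i + r))]
  simp

theorem pvB_eq (text : String) (max_r : Int) :
    coincidence_index_alt text max_r = (PySem.List.pyRange 1 (max_r + 1) 1).map
      (fun r => (r, ((((PySem.Set.ofList text.toList).map (pvPosIdx text.toList)).flatMap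
          (pvEvs max_r)).count r : Int))) := by
  show (List.foldl (fun st ps => pvPairsB max_r st ps)
      ((PySem.List.pyRange 1 (max_r + 1) 1).foldl (fun d r => d.insert r 0) (PySem.Dict.empty : PySem.Dict Int Int))
      ((List.foldl (fun d pr => d.modify pr.2 ([] : List Int) (fun l => l ++ [pr.1]))
        (PySem.Dict.empty : PySem.Dict Char (List Int)) (PySem.List.enumerate text.toList 0)).values)).items = _
  have hPkeys : ((PySem.List.enumerate text.toList 0).foldl
      (fun d pr => d.modify pr.2 ([] : List Int) (fun l => l ++ [pr.1])) PySem.Dict.empty).keys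
      = PySem.Set.ofList text.toList := by
    refine (PySem.Dict.keys_foldl_modify_key (PySem.List.enumerate text.toList 0)
      (fun pr : Int × Char => pr.2) ([] : List Int)
      (fun _ pr => fun t => t ++ [pr.1]) PySem.Dict.empty).trans ?_
    rw [PySem.Dict.keys_empty, PySem.List.map_snd_enumerate]
    rfl
  have hPnodup : ((PySem.List.enumerate text.toList 0).foldl
      (fun d pr => d.modify pr.2 ([] : List Int) (fun l => l ++ [pr.1])) PySem.Dict.empty).keys.Nodup := by
    rw [hPkeys]; exact PySem.Set.nodup_ofList _
  have hvals : ((PySem.List.enumerate text.toList 0).foldl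
      (fun d pr => d.modify pr.2 ([] : List Int) (fun l => l ++ [pr.1])) PySem.Dict.empty).values
      = (PySem.Set.ofList text.toList).map (pvPosIdx text.toList) := by
    rw [PySem.Dict.values_eq_map_keys _ hPnodup ([] : List Int), hPkeys]
    refine List.map_congr_left (fun c _ => ?_)
    refine (pvPosGetD (PySem.List.enumerate text.toList 0) PySem.Dict.empty c).trans ?_
    simp [pvPosIdx]
  rw [hvals]
  rw [pvValuesFold_eq max_r ((PySem.Set.ofList text.toList).map (pvPosIdx text.toList))
    ((PySem.List.pyRange 1 (max_r + 1) 1).foldl (fun d r => d.insert r 0) (PySem.Dict.empty : PySem.Dict Int Int))]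
  have hevs : ∀ e ∈ ((PySem.Set.ofList text.toList).map (pvPosIdx text.toList)).flatMap (pvEvs max_r),
      1 ≤ e ∧ e ≤ max_r := by
    intro e he
    rw [List.mem_flatMap] at he
    obtain ⟨ps, hps, he⟩ := he
    obtain ⟨c, _, rfl⟩ := List.mem_map.1 hps
    exact pvEvs_mem max_r _ (pvPosIdx_sorted text.toList c) e he
  have hSkeys : ((((PySem.Set.ofList text.toList).map (pvPosIdx text.toList)).flatMap
      (pvEvs max_r)).foldl pvModAdd ((PySem.List.pyRange 1 (max_r + 1) 1).foldl
        (fun d r => d.insert r 0) (PySem.Dict.empty : PySem.Dict Int Int))).keys = PySem.List.pyRange 1 (max_r + 1) 1 := by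
    refine (PySem.Dict.keys_foldl_modify _ (0 : Int) (fun _ _ => fun x => x + 1) _).trans ?_
    rw [pvStats0_keys max_r]
    refine pvSetUpdate_self _ _ (fun e he => ?_)
    rw [PySem.List.mem_pyRange_one]
    have := hevs e he
    omega
  have hSnodup : ((((PySem.Set.ofList text.toList).map (pvPosIdx text.toList)).flatMap
      (pvEvs max_r)).foldl pvModAdd ((PySem.List.pyRange 1 (max_r + 1) 1).foldl
        (fun d r => d.insert r 0) (PySem.Dict.empty : PySem.Dict Int Int))).keys.Nodup := by
    rw [hSkeys]; exact PySem.List.nodup_pyRange_one 1 (max_r + 1)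
  rw [PySem.Dict.items_eq_map_keys _ hSnodup (0 : Int), hSkeys]
  refine List.map_congr_left (fun r _ => ?_)
  congr 1
  refine (PySem.Dict.getD_foldl_modify_add_one _ _ r).trans ?_
  rw [pvStats0_getD r _ PySem.Dict.empty (by simp)]
  simp

theorem pv_main (text : String) (max_r : Int) :
    coincidence_index text max_r = coincidence_index_alt text max_r := by
  rw [pvA_eq, pvB_eq]
  refine List.map_congr_left (fun r hr => ?_)
  rw [PySem.List.mem_pyRange_one] at hr
  have h := pvCountEq text.toList max_r r hr.1 (by omega)
  exact congrArg (fun v => (r, v)) h.symm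

-- ===== VERDICT (by name: the statement is the Claim_ definition above) =====
theorem coincidence_index_spec : Claim_equal_coincidence_index := by
  intro text max_r _
  exact pv_main text max_r
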